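-- pv_equiv track=rewrite | github.com/infomuscle/algorithms-programmers | line-2020-python/line-2020-2.py | solution
-- ===== SOURCE A (Python) =====
-- def solution(answer_sheet, sheets):
--     answer = 0
--
--     while len(sheets) != 0:
--         last = sheets.pop()
--         for s in sheets:
--             temp = getCheatingRate(answer_sheet, last, s)
--             if temp > answer:
--                 answer = temp
--
--     return answer
--
-- def getCheatingRate(answer, sheet1, sheet2):
--     suspicion = 0
--     suspicionLength = 0
--     longestSuspicion = 0
--
--     for i in range(len(answer)):
--         if answer[i] != sheet1[i] and sheet1[i] == sheet2[i]:
--             suspicion += 1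
--             suspicionLength += 1
--         else:
--             if suspicionLength > longestSuspicion:
--                 longestSuspicion = suspicionLength
--             suspicionLength = 0
--
--     if suspicionLength > longestSuspicion:
--         longestSuspicion = suspicionLength
--
--     return suspicion + (longestSuspicion*longestSuspicion)
-- ===== SOURCE B (Python) =====
-- def solution(answer_sheet, sheets):
--     # Same outer while/pop loop as the original (sheets is emptied the same way);
--     # the pairwise rate is computed by a mask-then-longest-run decomposition instead
--     # of the fused three-accumulator scan.
--     answer = 0
--     while len(sheets) != 0:
--         last = sheets.pop()
--         for s in sheets:
--             temp = getCheatingRate(answer_sheet, last, s)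
--             if temp > answer:
--                 answer = temp
--     return answer
--
-- def getCheatingRate(answer, sheet1, sheet2):
--     flags = [answer[i] != sheet1[i] and sheet1[i] == sheet2[i] for i in range(len(answer))]
--     suspicion = sum(flags)
--     longest = 0
--     i = 0
--     n = len(flags)
--     while i < n:
--         if flags[i]:
--             j = i + 1
--             while j < n and flags[j]:
--                 j += 1
--             if j - i > longest:
--                 longest = j - i
--             i = j
--         else:
--             i += 1
--     return suspicion + longest * longest
-- ===== Notes on version B (the rewrite author's own statement) =====
-- stated objective: alternative
-- what changed: getCheatingRate's fused single-pass scan carrying (suspicion, current run, longest run) is replaced by a mask-then-scan decomposition: build the boolean mismatch mask once, take its sum for suspicion, and find the longest True run with a separate run-skipping scan; the outer while/pop loop is kept so sheets is emptied the same way.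
-- outside the precondition, e.g. on solution([1, 2], [[5], [1, 2]]): A returns 0, B returns 0
import Mathlib
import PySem

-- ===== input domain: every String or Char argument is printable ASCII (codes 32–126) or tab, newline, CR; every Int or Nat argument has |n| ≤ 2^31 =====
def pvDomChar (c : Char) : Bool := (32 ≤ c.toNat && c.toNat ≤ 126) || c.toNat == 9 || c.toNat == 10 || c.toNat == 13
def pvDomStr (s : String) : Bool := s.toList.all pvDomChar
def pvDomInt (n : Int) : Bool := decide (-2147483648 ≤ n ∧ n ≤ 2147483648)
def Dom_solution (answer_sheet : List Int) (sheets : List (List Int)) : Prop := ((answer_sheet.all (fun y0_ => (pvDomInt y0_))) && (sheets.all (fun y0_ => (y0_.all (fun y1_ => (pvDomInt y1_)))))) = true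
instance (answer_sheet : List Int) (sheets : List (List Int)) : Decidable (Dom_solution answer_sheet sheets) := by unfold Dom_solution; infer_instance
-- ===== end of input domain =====

-- B replaces the fused three-accumulator scan inside getCheatingRate by a mask-then-longest-run
-- decomposition (same outer while/pop loop; both A and B empty `sheets` in place — the claim is
-- about return values only).


-- ===== PORT A =====
-- getCheatingRate of A: one fused scan carrying (suspicion, suspicionLength, longestSuspicion)
def getCheatingRateA (answer sheet1 sheet2 : List Int) : Int :=
  let r := (PySem.List.pyRange 0 answer.length 1).foldl
    (fun (st : Int × Int × Int) i =>
      if PySem.List.pyGetD answer i 0 ≠ PySem.List.pyGetD sheet1 i 0 ∧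
         PySem.List.pyGetD sheet1 i 0 = PySem.List.pyGetD sheet2 i 0 then
        (st.1 + 1, st.2.1 + 1, st.2.2)
      else
        (st.1, 0, if st.2.1 > st.2.2 then st.2.1 else st.2.2))
    (0, 0, 0)
  let longest := if r.2.1 > r.2.2 then r.2.1 else r.2.2
  r.1 + longest * longest

-- while len(sheets) != 0: last = sheets.pop(); for s in sheets: ...
def solLoopA (answer_sheet : List Int) (sheets : List (List Int)) (answer : Int) : Int :=
  match sheets with
  | [] => answer
  | x :: t =>
    let rest := (x :: t).dropLast
    let last := (x :: t).getLast (by simp)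
    solLoopA answer_sheet rest
      (rest.foldl (fun a s =>
        let temp := getCheatingRateA answer_sheet last s
        if temp > a then temp else a) answer)
termination_by sheets.length
decreasing_by simp [List.length_dropLast]

def solution (answer_sheet : List Int) (sheets : List (List Int)) : Int :=
  solLoopA answer_sheet sheets 0

-- ===== PORT B =====
-- longest run of True in the mask (port of B's index-scan with an inner while over the run)
def longestRunB : List Bool → Int
  | [] => 0
  | b :: t =>
    if b then
      let k : Int := ((t.takeWhile (fun x => x)).length : Int)
      let c := longestRunB (t.dropWhile (fun x => x))
      if 1 + k > c then 1 + k else c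
    else longestRunB t
termination_by l => l.length
decreasing_by
  · have := List.length_dropWhile_le (fun x : Bool => x) t
    simp only [List.length_cons]; omega
  · simp only [List.length_cons]; omega

def getCheatingRateB (answer sheet1 sheet2 : List Int) : Int :=
  let flags := (PySem.List.pyRange 0 answer.length 1).map
    (fun i => decide (PySem.List.pyGetD answer i 0 ≠ PySem.List.pyGetD sheet1 i 0 ∧
                      PySem.List.pyGetD sheet1 i 0 = PySem.List.pyGetD sheet2 i 0))
  let suspicion : Int := (flags.count true : Int)
  let longest := longestRunB flags
  suspicion + longest * longest

def solLoopB (answer_sheet : List Int) (sheets : List (List Int)) (answer : Int) : Int :=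
  match sheets with
  | [] => answer
  | x :: t =>
    let rest := (x :: t).dropLast
    let last := (x :: t).getLast (by simp)
    solLoopB answer_sheet rest
      (rest.foldl (fun a s =>
        let temp := getCheatingRateB answer_sheet last s
        if temp > a then temp else a) answer)
termination_by sheets.length
decreasing_by simp [List.length_dropLast]

def solution_alt (answer_sheet : List Int) (sheets : List (List Int)) : Int :=
  solLoopB answer_sheet sheets 0

-- ===== PRECONDITION & SPEC =====
-- Pre_ excludes inputs with at least two sheets where some sheet is shorter than the answer
-- sheet: comparing such a sheet generally raises IndexError in A (except in lucky cases where
-- the short-circuit `and` never reaches the short sheet, on which A and B agree anyway).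
def Pre_solution (answer_sheet : List Int) (sheets : List (List Int)) : Prop :=
  sheets.length ≤ 1 ∨ ∀ s ∈ sheets, answer_sheet.length ≤ s.length
instance (answer_sheet : List Int) (sheets : List (List Int)) : Decidable (Pre_solution answer_sheet sheets) := by unfold Pre_solution; infer_instance

def pvWitness_solution : List Int × List (List Int) := ([1, 2, 3], [[1, 1, 3], [2, 1, 3], [1, 2, 3]])

def Spec_solution (answer_sheet : List Int) (sheets : List (List Int)) (out : Int) : Prop := out = solution_alt answer_sheet sheets
instance (answer_sheet : List Int) (sheets : List (List Int)) (out : Int) : Decidable (Spec_solution answer_sheet sheets out) := by unfold Spec_solution; infer_instance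

-- ===== CLAIM (what is proved, stated in full; the proofs are below) =====
def Claim_equal_solution : Prop := ∀ (answer_sheet : List Int) (sheets : List (List Int)), Dom_solution answer_sheet sheets → Pre_solution answer_sheet sheets → Spec_solution answer_sheet sheets (solution answer_sheet sheets)

-- ===== LEMMAS AND PROOFS =====

-- A's fold step on the boolean mask
def stepA (st : Int × Int × Int) (b : Bool) : Int × Int × Int :=
  cond b (st.1 + 1, st.2.1 + 1, st.2.2) (st.1, 0, if st.2.1 > st.2.2 then st.2.1 else st.2.2)

-- "best achievable run value" of A's scan given current trailing run length l
def bestFrom : List Bool → Int → Int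
  | [], l => l
  | true :: t, l => bestFrom t (l + 1)
  | false :: t, l => max l (bestFrom t 0)

lemma lrB_false (v : List Bool) : longestRunB (false :: v) = longestRunB v := by
  simp [longestRunB]

lemma lrB_true (v : List Bool) : longestRunB (true :: v) =
    (if 1 + ((v.takeWhile (fun x => x)).length : Int) > longestRunB (v.dropWhile (fun x => x))
     then 1 + ((v.takeWhile (fun x => x)).length : Int)
     else longestRunB (v.dropWhile (fun x => x))) := by
  simp [longestRunB]

lemma longestRunB_nonneg : ∀ bs : List Bool, 0 ≤ longestRunB bs := by
  suffices h : ∀ (n : Nat) (bs : List Bool), bs.length ≤ n → 0 ≤ longestRunB bs by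
    intro bs; exact h bs.length bs le_rfl
  intro n
  induction n with
  | zero =>
    intro bs h
    cases bs with
    | nil => simp [longestRunB]
    | cons b t => simp at h
  | succ m ih =>
    intro bs h
    cases bs with
    | nil => simp [longestRunB]
    | cons b t =>
      simp only [List.length_cons] at h
      cases b with
      | false => rw [lrB_false]; exact ih t (by omega)
      | true =>
        have hd := List.length_dropWhile_le (fun x : Bool => x) t
        have hc := ih (t.dropWhile (fun x => x)) (by omega)
        rw [lrB_true]
        split <;> [positivity; exact hc]

lemma foldA_char : ∀ (bs : List Bool) (s l L : Int),
    (bs.foldl stepA (s, l, L)).1 = s + (bs.count true : Int) ∧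
    max (bs.foldl stepA (s, l, L)).2.2 (bs.foldl stepA (s, l, L)).2.1
      = max L (bestFrom bs l) := by
  intro bs
  induction bs with
  | nil => intro s l L; simp [bestFrom, max_comm]
  | cons b t ih =>
    intro s l L
    cases b with
    | true =>
      have h := ih (s + 1) (l + 1) L
      simp only [List.foldl_cons, stepA, cond_true] at *
      refine ⟨?_, h.2⟩
      rw [h.1, List.count_cons]
      simp
      omega
    | false =>
      have h := ih s 0 (if l > L then l else L)
      simp only [List.foldl_cons, stepA, cond_false] at *
      constructor
      · rw [h.1, List.count_cons]; simp
      · rw [h.2]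
        show max (if l > L then l else L) (bestFrom t 0) = max L (bestFrom (false :: t) l)
        simp only [bestFrom]
        split <;> omega

lemma bestAux : ∀ u : List Bool,
    max (((u.takeWhile (fun x => x)).length : Int)) (longestRunB (u.dropWhile (fun x => x)))
      = longestRunB u := by
  intro u
  cases u with
  | nil => simp [longestRunB]
  | cons c v =>
    cases c with
    | true =>
      rw [lrB_true]
      simp only [List.takeWhile_cons, List.dropWhile_cons]
      simp
      have := longestRunB_nonneg (v.dropWhile (fun x => x))
      split <;> omega
    | false =>
      rw [lrB_false]
      simp [lrB_false]
      exact longestRunB_nonneg v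

lemma bestFrom_eq : ∀ (t : List Bool) (l : Int), 0 ≤ l →
    bestFrom t l = max (l + ((t.takeWhile (fun x => x)).length : Int))
                       (longestRunB (t.dropWhile (fun x => x))) := by
  intro t
  induction t with
  | nil => intro l hl; simp [bestFrom, longestRunB]; omega
  | cons b u ih =>
    intro l hl
    cases b with
    | true =>
      show bestFrom u (l + 1) = _
      simp only [List.takeWhile_cons, List.dropWhile_cons]
      rw [ih (l + 1) (by omega)]
      simp
      omega
    | false =>
      show max l (bestFrom u 0) = _
      rw [ih 0 le_rfl]
      simp only [List.takeWhile_cons, List.dropWhile_cons]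
      simp [lrB_false]
      have h1 := bestAux u
      omega

lemma bestFrom_zero (bs : List Bool) : bestFrom bs 0 = longestRunB bs := by
  rw [bestFrom_eq bs 0 le_rfl]
  have := bestAux bs
  omega

lemma inner_eq (a s1 s2 : List Int) : getCheatingRateA a s1 s2 = getCheatingRateB a s1 s2 := by
  unfold getCheatingRateA getCheatingRateB
  set f : Int → Bool := fun i => decide (PySem.List.pyGetD a i 0 ≠ PySem.List.pyGetD s1 i 0 ∧
      PySem.List.pyGetD s1 i 0 = PySem.List.pyGetD s2 i 0) with hf
  have hfold : (PySem.List.pyRange 0 a.length 1).foldl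
      (fun (st : Int × Int × Int) i =>
        if PySem.List.pyGetD a i 0 ≠ PySem.List.pyGetD s1 i 0 ∧
           PySem.List.pyGetD s1 i 0 = PySem.List.pyGetD s2 i 0 then
          (st.1 + 1, st.2.1 + 1, st.2.2)
        else (st.1, 0, if st.2.1 > st.2.2 then st.2.1 else st.2.2)) (0, 0, 0)
      = ((PySem.List.pyRange 0 a.length 1).map f).foldl stepA (0, 0, 0) := by
    rw [List.foldl_map]
    apply List.foldl_ext
    intro st i _
    simp only [hf, stepA]
    rw [Bool.cond_decide]
  simp only [hfold]
  set flags := (PySem.List.pyRange 0 a.length 1).map f with hflags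
  have h := foldA_char flags 0 0 0
  have hb0 := bestFrom_zero flags
  rcases h with ⟨h1, h2⟩
  rw [hb0] at h2
  have hmax : (if (flags.foldl stepA (0,0,0)).2.1 > (flags.foldl stepA (0,0,0)).2.2
      then (flags.foldl stepA (0,0,0)).2.1 else (flags.foldl stepA (0,0,0)).2.2)
      = longestRunB flags := by
    have := longestRunB_nonneg flags
    rw [max_comm] at h2
    split <;> omega
  rw [h1, hmax]
  ring

lemma loop_eq (answer_sheet : List Int) :
    ∀ (n : Nat) (sheets : List (List Int)), sheets.length ≤ n → ∀ (a : Int),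
      solLoopA answer_sheet sheets a = solLoopB answer_sheet sheets a := by
  intro n
  induction n with
  | zero =>
    intro sheets h a
    cases sheets with
    | nil => simp [solLoopA, solLoopB]
    | cons x t => simp at h
  | succ m ih =>
    intro sheets h a
    cases sheets with
    | nil => simp [solLoopA, solLoopB]
    | cons x t =>
      rw [solLoopA, solLoopB]
      have hfold : ∀ (init : Int) (l : List (List Int)),
          l.foldl (fun a s =>
            let temp := getCheatingRateA answer_sheet ((x :: t).getLast (by simp)) s
            if temp > a then temp else a) init
          = l.foldl (fun a s =>
            let temp := getCheatingRateB answer_sheet ((x :: t).getLast (by simp)) s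
            if temp > a then temp else a) init := by
        intro init l
        apply List.foldl_ext
        intro acc s _
        simp only [inner_eq]
      rw [hfold]
      apply ih
      simp at h ⊢
      omega

-- ===== VERDICT (by name: the statement is the Claim_ definition above) =====
theorem solution_spec : Claim_equal_solution := by
  intro answer_sheet sheets _ _
  show solution answer_sheet sheets = solution_alt answer_sheet sheets
  exact loop_eq answer_sheet sheets.length sheets le_rfl 0
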